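-- pv_equiv track=rewrite | github.com/Miskecy/united-pool-gpu-script | output_parsers.py | parse_vanity_v2
-- ===== SOURCE A (Python) =====
-- def _is_hex64(s):
--     try:
--         t = s.strip().lower().replace("0x", "")
--         return len(t) == 64 and all(c in "0123456789abcdef" for c in t)
--     except Exception:
--         return False
--
-- def _norm_hex(s):
--     t = s.strip().replace(" ", "")
--     t = t.replace("0x", "")
--     t = t.lower()
--     if len(t) == 64 and _is_hex64(t):
--         return t.upper()
--     return None
--
-- def parse_vanity_v2(text, extras):
--     extras_set = set([a for a in (extras or []) if isinstance(a, str)])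
--     keys_to_post = []
--     found_pairs = []
--     current_address = None
--     lines = text.splitlines()
--     i = 0
--     hexset = set("0123456789abcdefABCDEF")
--     while i < len(lines):
--         line = lines[i]
--         if "Pub Addr:" in line or "PubAddress:" in line or "Public Addr:" in line or "Public Address:" in line:
--             try:
--                 if "Pub Addr:" in line:
--                     token = "Pub Addr:"
--                 elif "PubAddress:" in line:
--                     token = "PubAddress:"
--                 elif "Public Addr:" in line:
--                     token = "Public Addr:"
--                 else:
--                     token = "Public Address:"
--                 current_address = line.split(token, 1)[1].strip()
--             except Exception:
--                 current_address = None
--         elif "Priv (HEX):" in line: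
--             try:
--                 seg = line.split("Priv (HEX):", 1)[1]
--             except Exception:
--                 seg = ""
--             buf = seg.replace("0x", "")
--             buf = "".join([c for c in buf if c in hexset])
--             j = i + 1
--             while len(buf) < 64 and j < len(lines):
--                 nxt = lines[j]
--                 buf += "".join([c for c in (nxt or "") if c in hexset])
--                 j += 1
--             if len(buf) >= 64:
--                 hx = buf[:64].upper()
--                 if current_address:
--                     if hx:
--                         if current_address in extras_set:
--                             found_pairs.append((current_address, hx))
--                         else:
--                             keys_to_post.append(hx)
--                     current_address = None
--                 i = j - 1
--         else:
--             parts = (line or "").strip().split()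
--             if len(parts) >= 2:
--                 addr = parts[0].strip()
--                 hx = _norm_hex(parts[1])
--                 if hx:
--                     if addr in extras_set:
--                         found_pairs.append((addr, hx))
--                     else:
--                         keys_to_post.append(hx)
--         i += 1
--     return keys_to_post, found_pairs
-- ===== SOURCE B (Python) =====
-- # B: two staged passes instead of A's index loop with lookahead-and-rewind: every line
-- # is first classified once into a token (address / priv-segment buffer / fallback pair
-- # / skip) carrying its hex characters, then a structural recursion over the token list
-- # consumes it from the front, borrowing whole tokens into the hex buffer; hex characters
-- # are recognized by range comparisons and the fallback value by a single validation pass.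
-- _TOKENS = ("Pub Addr:", "PubAddress:", "Public Addr:", "Public Address:")
--
--
-- def _hexchars(s):
--     return [c for c in s if '0' <= c <= '9' or 'a' <= c <= 'f' or 'A' <= c <= 'F']
--
--
-- def _norm64(s):
--     t = s.strip().replace(" ", "").replace("0x", "").lower()
--     if len(t) == 64 and all('0' <= c <= '9' or 'a' <= c <= 'f' for c in t):
--         return t.upper()
--     return None
--
--
-- def _classify(line):
--     for t in _TOKENS:
--         if t in line:
--             return ('addr', line.split(t, 1)[1].strip())
--     if "Priv (HEX):" in line:
--         return ('priv', _hexchars(line.split("Priv (HEX):", 1)[1].replace("0x", "")))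
--     parts = line.split()
--     if len(parts) >= 2:
--         hx = _norm64(parts[1])
--         if hx is not None:
--             return ('pair', (parts[0], hx))
--     return ('skip', None)
--
--
-- def _take64(toks, buf):
--     """Borrow whole tokens' hex chars into buf until it holds 64; None on underflow."""
--     while len(buf) < 64:
--         if not toks:
--             return None
--         buf = buf + toks[0][1]
--         toks = toks[1:]
--     return ''.join(buf[:64]).upper(), toks
--
--
-- def parse_vanity_v2(text, extras):
--     extras_set = {a for a in (extras or []) if isinstance(a, str)}
--     keys_to_post = []
--     found_pairs = []
--     toks = [(_classify(l), _hexchars(l)) for l in text.splitlines()]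
--     cur = None
--     while toks:
--         (kind, payload), _ = toks[0]
--         rest = toks[1:]
--         if kind == 'addr':
--             cur = payload
--         elif kind == 'priv':
--             got = _take64(rest, payload)
--             if got is not None:
--                 hx, rest = got
--                 if cur:
--                     if cur in extras_set:
--                         found_pairs.append((cur, hx))
--                     else:
--                         keys_to_post.append(hx)
--                     cur = None
--         elif kind == 'pair':
--             addr, hx = payload
--             if addr in extras_set:
--                 found_pairs.append((addr, hx))
--             else:
--                 keys_to_post.append(hx)
--         toks = rest
--     return keys_to_post, found_pairs
-- ===== Notes on version B (the rewrite author's own statement) =====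
-- stated objective: alternative
-- what changed: B replaces A's single index-based while loop with lookahead and i = j - 1 rewind by two staged passes: each line is first classified exactly once into a token (address / priv hex buffer / validated fallback pair / skip) that also carries the line's hex characters, and then a front-consuming recursion over the token list drives a small state machine, borrowing whole pre-extracted hex-character tokens into the buffer instead of re-scanning lines; …
import Mathlib
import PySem

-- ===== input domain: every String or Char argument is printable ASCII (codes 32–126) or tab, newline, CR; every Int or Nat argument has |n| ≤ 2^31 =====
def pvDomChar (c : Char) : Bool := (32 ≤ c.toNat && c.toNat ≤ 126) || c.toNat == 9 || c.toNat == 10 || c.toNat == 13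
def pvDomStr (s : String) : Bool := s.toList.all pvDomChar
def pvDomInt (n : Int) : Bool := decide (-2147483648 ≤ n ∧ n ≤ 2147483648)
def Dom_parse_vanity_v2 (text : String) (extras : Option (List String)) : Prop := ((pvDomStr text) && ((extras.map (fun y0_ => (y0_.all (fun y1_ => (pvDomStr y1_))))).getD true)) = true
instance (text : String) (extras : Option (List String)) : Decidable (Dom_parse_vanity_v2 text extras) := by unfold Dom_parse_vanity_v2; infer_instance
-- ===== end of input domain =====

-- One-line summary: B parses the same output in two staged passes — every line is
-- classified once into a token (address / priv hex buffer / validated pair / skip)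
-- carrying its hex characters, then a structural recursion over the token list drives
-- a small state machine — instead of A's index loop with lookahead and i = j - 1
-- rewind and A's redundant double normalization; return values proved equal.

-- ===== PORT A =====
-- A's _is_hex64 (its t written inline)
def pvIsHex64 (s : String) : Bool :=
  (PySem.Str.replace (PySem.Str.lower (PySem.Str.strip s)) "0x" "").toList.length == 64 &&
    (PySem.Str.replace (PySem.Str.lower (PySem.Str.strip s)) "0x" "").toList.all
      (fun c => ("0123456789abcdef".toList).contains c)

-- A's _norm_hex (its t written inline)
def pvNormHex (s : String) : Option String :=
  if (PySem.Str.lower (PySem.Str.replace (PySem.Str.replace (PySem.Str.strip s) " " "") "0x" "")).toList.length == 64 &&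
      pvIsHex64 (PySem.Str.lower (PySem.Str.replace (PySem.Str.replace (PySem.Str.strip s) " " "") "0x" "")) then
    some (PySem.Str.upper (PySem.Str.lower (PySem.Str.replace (PySem.Str.replace (PySem.Str.strip s) " " "") "0x" "")))
  else none

-- "".join([c for c in s if c in hexset])
def pvHexFilterA (s : String) : List Char :=
  s.toList.filter (fun c => ("0123456789abcdefABCDEF".toList).contains c)

-- Python truthiness of current_address (None or str)
def pvTruthy (o : Option String) : Bool :=
  match o with
  | none => false
  | some s => s != ""

-- line.split(token, 1)[1]
def pvAfterA (line tok : String) : String :=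
  ((PySem.Str.splitMax? line tok 1).getD []).getD 1 ""

-- A's inner while loop: while len(buf) < 64 and j < len(lines)
def pvInnerA (lines : List String) (buf : List Char) (j : Nat) : List Char × Nat :=
  if h : buf.length < 64 ∧ j < lines.length then
    pvInnerA lines (buf ++ pvHexFilterA lines[j]) (j + 1)
  else (buf, j)
termination_by lines.length - j
decreasing_by omega

-- buf and j after A's inner loop, started from the "Priv (HEX):" segment of `line`
def pvScanA (lines : List String) (line : String) (j : Nat) : List Char × Nat :=
  pvInnerA lines (pvHexFilterA (PySem.Str.replace (pvAfterA line "Priv (HEX):") "0x" "")) j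

-- the body of one iteration of A's main while loop: from the current line and
-- state (i, current_address, keys_to_post, found_pairs) to the updated state
def pvStepA (ex : List String) (lines : List String) (i : Nat) (line : String)
    (cur : Option String) (keys : List String) (pairs : List (String × String)) :
    Nat × Option String × List String × List (String × String) :=
  if PySem.Str.isIn "Pub Addr:" line || PySem.Str.isIn "PubAddress:" line ||
      PySem.Str.isIn "Public Addr:" line || PySem.Str.isIn "Public Address:" line then
    (i + 1,
     some (PySem.Str.strip (pvAfterA line
       (if PySem.Str.isIn "Pub Addr:" line then "Pub Addr:"
        else if PySem.Str.isIn "PubAddress:" line then "PubAddress:"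
        else if PySem.Str.isIn "Public Addr:" line then "Public Addr:"
        else "Public Address:"))),
     keys, pairs)
  else if PySem.Str.isIn "Priv (HEX):" line then
    if 64 ≤ (pvScanA lines line (i + 1)).1.length then
      if pvTruthy cur then
        if PySem.Str.upper (String.ofList ((pvScanA lines line (i + 1)).1.take 64)) != "" then
          if PySem.Set.contains ex (cur.getD "") then
            ((pvScanA lines line (i + 1)).2, none, keys,
             pairs ++ [(cur.getD "", PySem.Str.upper (String.ofList ((pvScanA lines line (i + 1)).1.take 64)))])
          else
            ((pvScanA lines line (i + 1)).2, none,
             keys ++ [PySem.Str.upper (String.ofList ((pvScanA lines line (i + 1)).1.take 64))], pairs)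
        else ((pvScanA lines line (i + 1)).2, none, keys, pairs)
      else ((pvScanA lines line (i + 1)).2, cur, keys, pairs)
    else (i + 1, cur, keys, pairs)
  else
    if 2 ≤ (PySem.Str.split₀ line).length then
      match pvNormHex ((PySem.Str.split₀ line).getD 1 "") with
      | some hx =>
        if PySem.Set.contains ex (PySem.Str.strip ((PySem.Str.split₀ line).getD 0 "")) then
          (i + 1, cur, keys, pairs ++ [(PySem.Str.strip ((PySem.Str.split₀ line).getD 0 ""), hx)])
        else (i + 1, cur, keys ++ [hx], pairs)
      | none => (i + 1, cur, keys, pairs)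
    else (i + 1, cur, keys, pairs)

-- A's main while loop over the line index i; the fuel argument (lines.length at
-- entry suffices since i strictly increases) only makes the recursion structural,
-- it never changes the computed value.
def pvLoopA (ex : List String) (lines : List String) :
    Nat → Nat → Option String → List String → List (String × String) →
    List String × List (String × String)
  | 0, _, _, keys, pairs => (keys, pairs)
  | fuel + 1, i, cur, keys, pairs =>
    if hi : i < lines.length then
      pvLoopA ex lines fuel (pvStepA ex lines i lines[i] cur keys pairs).1
        (pvStepA ex lines i lines[i] cur keys pairs).2.1
        (pvStepA ex lines i lines[i] cur keys pairs).2.2.1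
        (pvStepA ex lines i lines[i] cur keys pairs).2.2.2
    else (keys, pairs)

def parse_vanity_v2 (text : String) (extras : Option (List String)) :
    List String × List (String × String) :=
  pvLoopA (PySem.Set.ofList (extras.getD [])) (PySem.Str.splitlines text)
    (PySem.Str.splitlines text).length 0 none [] []

-- ===== PORT B =====
-- the classified shape of one line
inductive BKind where
  | addrK : String → BKind
  | privK : List Char → BKind
  | pairK : String → String → BKind
  | skipK : BKind
deriving DecidableEq, Repr

def bTokens : List String := ["Pub Addr:", "PubAddress:", "Public Addr:", "Public Address:"]

-- hex characters by range comparison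
def bIsHexChar (c : Char) : Bool :=
  (('0' ≤ c && c ≤ '9') || ('a' ≤ c && c ≤ 'f')) || ('A' ≤ c && c ≤ 'F')

def bHexChars (cs : List Char) : List Char := cs.filter bIsHexChar

-- B's _norm64: one normalization pipeline, one validation pass
def bNorm64 (s : String) : Option String :=
  let t := PySem.Str.lower (PySem.Str.replace (PySem.Str.replace (PySem.Str.strip s) " " "") "0x" "")
  if t.toList.length == 64 && t.toList.all (fun c => ('0' ≤ c && c ≤ '9') || ('a' ≤ c && c ≤ 'f')) then
    some (PySem.Str.upper t)
  else none

-- B's _classify: each line is read exactly once into a BKind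
def bClassify (line : String) : BKind :=
  match bTokens.find? (fun t => PySem.Str.isIn t line) with
  | some tok => .addrK (PySem.Str.strip (((PySem.Str.splitMax? line tok 1).getD []).getD 1 ""))
  | none =>
    if PySem.Str.isIn "Priv (HEX):" line then
      .privK (bHexChars (PySem.Str.replace
        (((PySem.Str.splitMax? line "Priv (HEX):" 1).getD []).getD 1 "") "0x" "").toList)
    else
      match PySem.Str.split₀ line with
      | p0 :: p1 :: _ =>
        match bNorm64 p1 with
        | some hx => .pairK p0 hx
        | none => .skipK
      | _ => .skipK

-- one token per line: its kind plus the line's hex characters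
def bTok (line : String) : BKind × List Char := (bClassify line, bHexChars line.toList)

-- B's _take64: borrow whole tokens' hex chars until the buffer holds 64
def bTake64 : List (BKind × List Char) → List Char →
    Option (String × List (BKind × List Char))
  | toks, buf =>
    if 64 ≤ buf.length then some (PySem.Str.upper (String.ofList (buf.take 64)), toks)
    else
      match toks with
      | [] => none
      | t :: rest => bTake64 rest (buf ++ t.2)
termination_by toks => toks.length
decreasing_by simp

-- needed by bGo's termination: _take64 never lengthens the worklist
theorem bTake64_len (toks : List (BKind × List Char)) (buf : List Char) :
    ∀ hx rest, bTake64 toks buf = some (hx, rest) → rest.length ≤ toks.length := by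
  fun_induction bTake64 toks buf with
  | case1 =>
    intro hx rest he
    simp only [Option.some.injEq, Prod.mk.injEq] at he
    simp [← he.2]
  | case2 => simp
  | case3 a b c d ih =>
    intro hx rest he
    have := ih hx rest he
    simp only [List.length_cons]
    omega

-- B's main loop: consume the token list from the front, carrying the pending address
def bGo (ex : List String) : List (BKind × List Char) → Option String →
    List String × List (String × String) → List String × List (String × String)
  | [], _, acc => acc
  | t :: rest, cur, acc =>
    match t.1 with
    | .addrK a => bGo ex rest (some a) acc
    | .privK buf0 =>
      match h : bTake64 rest buf0 with
      | some (hx, rest') =>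
        match cur with
        | some ca =>
          if ca != "" then
            bGo ex rest' none
              (if PySem.Set.contains ex ca then (acc.1, acc.2 ++ [(ca, hx)])
               else (acc.1 ++ [hx], acc.2))
          else bGo ex rest' (some ca) acc
        | none => bGo ex rest' none acc
      | none => bGo ex rest cur acc
    | .pairK a hx =>
      bGo ex rest cur
        (if PySem.Set.contains ex a then (acc.1, acc.2 ++ [(a, hx)])
         else (acc.1 ++ [hx], acc.2))
    | .skipK => bGo ex rest cur acc
termination_by toks => toks.length
decreasing_by
  all_goals try simp
  all_goals exact bTake64_len rest buf0 hx rest' h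

def parse_vanity_v2_alt (text : String) (extras : Option (List String)) :
    List String × List (String × String) :=
  bGo (PySem.Set.ofList (extras.getD [])) ((PySem.Str.splitlines text).map bTok) none ([], [])

-- ===== PRECONDITION & SPEC =====
def Spec_parse_vanity_v2 (text : String) (extras : Option (List String)) (out : List String × (List (String × String))) : Prop := out = parse_vanity_v2_alt text extras
instance (text : String) (extras : Option (List String)) (out : List String × (List (String × String))) : Decidable (Spec_parse_vanity_v2 text extras out) := by unfold Spec_parse_vanity_v2; infer_instance

-- ===== CLAIM (what is proved, stated in full; the proofs are below) =====
def Claim_equal_parse_vanity_v2 : Prop := ∀ (text : String) (extras : Option (List String)), Dom_parse_vanity_v2 text extras → Spec_parse_vanity_v2 text extras (parse_vanity_v2 text extras)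

-- ===== LEMMAS AND PROOFS =====

-- lowercase hex digits
def lhex : List Char := "0123456789abcdef".toList

theorem pvInnerA_ge (lines : List String) (buf : List Char) (j : Nat) :
    j ≤ (pvInnerA lines buf j).2 := by
  fun_induction pvInnerA lines buf j with
  | case1 buf j h ih => omega
  | case2 buf j h => simp

theorem pvInnerA_le_len (lines : List String) (buf : List Char) (j : Nat)
    (hj : j ≤ lines.length) : (pvInnerA lines buf j).2 ≤ lines.length := by
  fun_induction pvInnerA lines buf j with
  | case1 buf j h ih => exact ih (by omega)
  | case2 buf j h => simpa using hj

-- --- replace machinery ---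

theorem go_not_infix (old new : List Char) :
    ∀ (fuel : Nat) (l acc : List Char), ¬ old <:+: l →
      PySem.Chars.replace.go old new fuel l acc = acc.reverse ++ l := by
  intro fuel
  induction fuel with
  | zero => intro l acc _; rw [PySem.Chars.replace.go]
  | succ fuel ih =>
    intro l acc h
    cases l with
    | nil => rw [PySem.Chars.replace.go] <;> simp
    | cons c t =>
      have hp : old.isPrefixOf (c :: t) = false := by
        rw [Bool.eq_false_iff]
        intro hpre
        exact h (List.IsPrefix.isInfix (List.isPrefixOf_iff_prefix.mp hpre))
      have ht : ¬ old <:+: t := by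
        intro hit
        exact h (hit.trans (List.suffix_cons c t).isInfix)
      rw [PySem.Chars.replace.go, hp]
      simp only [Bool.false_eq_true, if_false]
      rw [ih t (c :: acc) ht]
      simp

theorem go_len_le (old : List Char) :
    ∀ (fuel : Nat) (l acc : List Char),
      (PySem.Chars.replace.go old [] fuel l acc).length ≤ acc.length + l.length := by
  intro fuel
  induction fuel with
  | zero => intro l acc; rw [PySem.Chars.replace.go]; simp
  | succ fuel ih =>
    intro l acc
    cases l with
    | nil => rw [PySem.Chars.replace.go] <;> simp
    | cons c t =>
      rw [PySem.Chars.replace.go]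
      by_cases hp : old.isPrefixOf (c :: t) = true
      · rw [hp]
        simp only [List.reverse_nil, List.nil_append, if_true]
        have h1 := ih (List.drop old.length (c :: t)) acc
        have hd : (List.drop old.length (c :: t)).length ≤ (c :: t).length := by
          simp [List.length_drop]
        simp only [List.length_cons] at *
        omega
      · rw [Bool.eq_false_iff.mpr hp]
        simp only [Bool.false_eq_true, if_false]
        have h1 := ih t (c :: acc)
        simp only [List.length_cons] at *
        omega

theorem go_len_lt (old : List Char) (hold : old ≠ []) :
    ∀ (fuel : Nat) (l acc : List Char), old <:+: l → l.length ≤ fuel →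
      (PySem.Chars.replace.go old [] fuel l acc).length < acc.length + l.length := by
  intro fuel
  induction fuel with
  | zero =>
    intro l acc hin hlen
    have hl : l = [] := by cases l <;> simp_all
    subst hl
    exact absurd (List.eq_nil_of_infix_nil hin) hold
  | succ fuel ih =>
    intro l acc hin hlen
    cases l with
    | nil => exact absurd (List.eq_nil_of_infix_nil hin) hold
    | cons c t =>
      rw [PySem.Chars.replace.go]
      by_cases hp : old.isPrefixOf (c :: t) = true
      · rw [hp]
        simp only [List.reverse_nil, List.nil_append, if_true]
        have h1 := go_len_le old fuel (List.drop old.length (c :: t)) acc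
        have h2 : 1 ≤ old.length := List.length_pos_iff.mpr hold
        have h3 : (List.drop old.length (c :: t)).length = (c :: t).length - old.length := by
          simp [List.length_drop]
        simp only [List.length_cons] at *
        omega
      · have hin' : old <:+: t := by
          rcases List.infix_cons_iff.mp hin with h | h
          · exact absurd (List.isPrefixOf_iff_prefix.mpr h) (by simpa using hp)
          · exact h
        rw [Bool.eq_false_iff.mpr hp]
        simp only [Bool.false_eq_true, if_false]
        have h1 := ih t (c :: acc) hin' (by simp only [List.length_cons] at hlen; omega)
        simp only [List.length_cons] at *
        omega

theorem replace_not_infix (l old new : List Char) (h1 : old ≠ []) (h2 : ¬ old <:+: l) :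
    PySem.Chars.replace l old new = l := by
  unfold PySem.Chars.replace
  rw [if_neg (by simp [h1])]
  rw [go_not_infix old new l.length l [] h2]
  simp

theorem replace_nil_len_lt (l old : List Char) (h1 : old ≠ []) (h2 : old <:+: l) :
    (PySem.Chars.replace l old []).length < l.length := by
  unfold PySem.Chars.replace
  rw [if_neg (by simp [h1])]
  simpa using go_len_lt old h1 l.length l [] h2 (le_refl _)

theorem replace_nil_len_le (l old : List Char) (h1 : old ≠ []) :
    (PySem.Chars.replace l old []).length ≤ l.length := by
  unfold PySem.Chars.replace
  rw [if_neg (by simp [h1])]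
  simpa using go_len_le old l.length l []

-- --- character facts ---

theorem mem_lhex_fix (c : Char) (h : c ∈ lhex) :
    PySem.Chars.lowerChar c = c ∧ PySem.Chars.isspace c = false ∧ c ≠ 'x' := by
  have h' : c ∈ ['0','1','2','3','4','5','6','7','8','9','a','b','c','d','e','f'] := h
  fin_cases h' <;> exact ⟨by decide, by decide, by decide⟩

theorem lowerChar_idem (c : Char) :
    PySem.Chars.lowerChar (PySem.Chars.lowerChar c) = PySem.Chars.lowerChar c := by
  have hZv : ('Z').val.toNat = 90 := by decide
  have hAv : ('A').val.toNat = 65 := by decide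
  unfold PySem.Chars.lowerChar PySem.Chars.isupper
  by_cases h : 'A' ≤ c ∧ c ≤ 'Z'
  · have hA : 65 ≤ c.val.toNat := by
      have h1 := h.1
      rw [Char.le_def, UInt32.le_iff_toNat_le, hAv] at h1
      exact h1
    have hcv : c.toNat = c.val.toNat := rfl
    have hv : (c.toNat + 32).isValidChar := Or.inl (by
      have h2 := h.2
      rw [Char.le_def, UInt32.le_iff_toNat_le, hZv] at h2
      show c.toNat + 32 < 55296
      omega)
    have ht : (Char.ofNat (c.toNat + 32)).toNat = c.toNat + 32 := by
      rw [Char.toNat_ofNat, if_pos hv]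
    have hcond : (decide ('A' ≤ c) && decide (c ≤ 'Z')) = true := by simp [h.1, h.2]
    rw [if_pos hcond]
    have hd : (decide ('A' ≤ Char.ofNat (c.toNat + 32)) &&
        decide (Char.ofNat (c.toNat + 32) ≤ 'Z')) ≠ true := by
      simp only [ne_eq, Bool.and_eq_true, decide_eq_true_eq, not_and]
      intro _ h2
      rw [Char.le_def, UInt32.le_iff_toNat_le, hZv] at h2
      have hvt : (Char.ofNat (c.toNat + 32)).val.toNat = (Char.ofNat (c.toNat + 32)).toNat := rfl
      rw [hvt, ht] at h2
      omega
    rw [if_neg hd]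
  · have hcond : (decide ('A' ≤ c) && decide (c ≤ 'Z')) ≠ true := by
      simpa [Bool.and_eq_true, decide_eq_true_eq] using h
    rw [if_neg hcond, if_neg hcond]

theorem lower_lower (w : List Char) :
    PySem.Chars.lower (PySem.Chars.lower w) = PySem.Chars.lower w := by
  unfold PySem.Chars.lower
  rw [List.map_map]
  exact List.map_congr_left fun c _ => lowerChar_idem c

-- B's range tests versus A's membership tests
theorem char_toNat_inj (c d : Char) : c = d ↔ c.toNat = d.toNat := by
  constructor
  · intro h; rw [h]
  · intro h; exact Char.ext (UInt32.toNat_inj.mp h)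

theorem hexU_eq (c : Char) :
    bIsHexChar c = (("0123456789abcdefABCDEF".toList).contains c) := by
  have hle : ∀ a b : Char, a ≤ b ↔ a.toNat ≤ b.toNat := by
    intro a b; rw [Char.le_def, UInt32.le_iff_toNat_le]; rfl
  unfold bIsHexChar
  rw [show ("0123456789abcdefABCDEF".toList) = ['0','1','2','3','4','5','6','7','8','9','a','b','c','d','e','f','A','B','C','D','E','F'] from by decide]
  rw [Bool.eq_iff_iff]
  simp only [Bool.or_eq_true, Bool.and_eq_true, decide_eq_true_eq, List.contains_eq_mem,
    List.mem_cons, List.not_mem_nil, or_false, hle, char_toNat_inj,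
    show Char.toNat '0' = 48 from rfl, show Char.toNat '1' = 49 from rfl, show Char.toNat '2' = 50 from rfl, show Char.toNat '3' = 51 from rfl, show Char.toNat '4' = 52 from rfl, show Char.toNat '5' = 53 from rfl, show Char.toNat '6' = 54 from rfl, show Char.toNat '7' = 55 from rfl, show Char.toNat '8' = 56 from rfl, show Char.toNat '9' = 57 from rfl, show Char.toNat 'a' = 97 from rfl, show Char.toNat 'b' = 98 from rfl, show Char.toNat 'c' = 99 from rfl, show Char.toNat 'd' = 100 from rfl, show Char.toNat 'e' = 101 from rfl, show Char.toNat 'f' = 102 from rfl, show Char.toNat 'A' = 65 from rfl, show Char.toNat 'B' = 66 from rfl, show Char.toNat 'C' = 67 from rfl, show Char.toNat 'D' = 68 from rfl, show Char.toNat 'E' = 69 from rfl, show Char.toNat 'F' = 70 from rfl]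
  omega

theorem hexL_eq (c : Char) :
    (('0' ≤ c && c ≤ '9') || ('a' ≤ c && c ≤ 'f')) = (lhex.contains c) := by
  have hle : ∀ a b : Char, a ≤ b ↔ a.toNat ≤ b.toNat := by
    intro a b; rw [Char.le_def, UInt32.le_iff_toNat_le]; rfl
  rw [show lhex = ['0','1','2','3','4','5','6','7','8','9','a','b','c','d','e','f'] from by decide]
  rw [Bool.eq_iff_iff]
  simp only [Bool.or_eq_true, Bool.and_eq_true, decide_eq_true_eq, List.contains_eq_mem,
    List.mem_cons, List.not_mem_nil, or_false, hle, char_toNat_inj,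
    show Char.toNat '0' = 48 from rfl, show Char.toNat '1' = 49 from rfl, show Char.toNat '2' = 50 from rfl, show Char.toNat '3' = 51 from rfl, show Char.toNat '4' = 52 from rfl, show Char.toNat '5' = 53 from rfl, show Char.toNat '6' = 54 from rfl, show Char.toNat '7' = 55 from rfl, show Char.toNat '8' = 56 from rfl, show Char.toNat '9' = 57 from rfl, show Char.toNat 'a' = 97 from rfl, show Char.toNat 'b' = 98 from rfl, show Char.toNat 'c' = 99 from rfl, show Char.toNat 'd' = 100 from rfl, show Char.toNat 'e' = 101 from rfl, show Char.toNat 'f' = 102 from rfl]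
  omega

theorem bHexChars_eq (s : String) : bHexChars s.toList = pvHexFilterA s := by
  unfold bHexChars pvHexFilterA
  exact List.filter_congr fun c _ => hexU_eq c

-- --- strip facts ---

theorem dropWhile_eq_self_of (p : Char → Bool) (l : List Char)
    (h : ∀ c ∈ l, p c = false) : List.dropWhile p l = l := by
  cases l with
  | nil => simp
  | cons c t => exact List.dropWhile_cons_of_neg (by simp [h c (by simp)])

theorem strip_eq_self_of_noSpace (l : List Char)
    (h : ∀ c ∈ l, PySem.Chars.isspace c = false) : PySem.Chars.strip l = l := by
  unfold PySem.Chars.strip PySem.Chars.lstrip PySem.Chars.rstrip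
  rw [dropWhile_eq_self_of _ l h]
  rw [dropWhile_eq_self_of _ l.reverse (fun c hc => h c (List.mem_reverse.mp hc))]
  exact List.reverse_reverse l

theorem strip_len_le (l : List Char) : (PySem.Chars.strip l).length ≤ l.length := by
  have h1 := (List.dropWhile_suffix (l := l) PySem.Chars.isspace).length_le
  have h2 := (List.dropWhile_suffix
    (l := (List.dropWhile PySem.Chars.isspace l).reverse) PySem.Chars.isspace).length_le
  unfold PySem.Chars.strip PySem.Chars.lstrip PySem.Chars.rstrip
  simp only [List.length_reverse] at h2 ⊢
  omega

theorem strip_eq_of_len (l : List Char) (h : (PySem.Chars.strip l).length = l.length) :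
    PySem.Chars.strip l = l := by
  have h1 := (List.dropWhile_suffix (l := l) PySem.Chars.isspace).length_le
  have h2 := (List.dropWhile_suffix
    (l := (List.dropWhile PySem.Chars.isspace l).reverse) PySem.Chars.isspace).length_le
  unfold PySem.Chars.strip PySem.Chars.lstrip PySem.Chars.rstrip at h ⊢
  simp only [List.length_reverse] at h h2
  have hls : (List.dropWhile PySem.Chars.isspace l).length = l.length := by omega
  have he1 : List.dropWhile PySem.Chars.isspace l = l :=
    (List.dropWhile_suffix PySem.Chars.isspace).eq_of_length hls
  rw [he1] at h ⊢
  have he2 : List.dropWhile PySem.Chars.isspace l.reverse = l.reverse := by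
    apply (List.dropWhile_suffix PySem.Chars.isspace).eq_of_length
    simp only [List.length_reverse]
    omega
  rw [he2]
  exact List.reverse_reverse l

-- split() chunks contain no whitespace, so A's parts[0].strip() is parts[0]
theorem split₀go_nospace :
    ∀ (s cur : List Char) (acc : List (List Char)),
      (∀ c ∈ cur, PySem.Chars.isspace c = false) →
      (∀ w ∈ acc, ∀ c ∈ w, PySem.Chars.isspace c = false) →
      ∀ w ∈ PySem.Chars.split₀.go s cur acc, ∀ c ∈ w, PySem.Chars.isspace c = false := by
  intro s
  induction s with
  | nil =>
    intro cur acc hcur hacc w hw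
    rw [PySem.Chars.split₀.go] at hw
    by_cases he : cur.isEmpty = true
    · rw [if_pos he] at hw
      exact hacc w (List.mem_reverse.mp hw)
    · rw [if_neg he] at hw
      rcases List.mem_cons.mp (List.mem_reverse.mp hw) with h | h
      · intro c hc
        exact hcur c (List.mem_reverse.mp (h ▸ hc))
      · exact hacc w h
  | cons c t ih =>
    intro cur acc hcur hacc w hw
    rw [PySem.Chars.split₀.go] at hw
    by_cases hsp : PySem.Chars.isspace c = true
    · rw [if_pos hsp] at hw
      by_cases he : cur.isEmpty = true
      · rw [if_pos he] at hw
        exact ih [] acc (by simp) hacc w hw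
      · rw [if_neg he] at hw
        refine ih [] (cur.reverse :: acc) (by simp) ?_ w hw
        intro v hv
        rcases List.mem_cons.mp hv with h | h
        · intro d hd
          exact hcur d (List.mem_reverse.mp (h ▸ hd))
        · exact hacc v h
    · rw [if_neg hsp] at hw
      refine ih (c :: cur) acc ?_ hacc w hw
      intro d hd
      rcases List.mem_cons.mp hd with h | h
      · exact h ▸ (Bool.eq_false_iff.mpr hsp)
      · exact hcur d h

theorem chunk_nospace (l w : List Char) (hw : w ∈ PySem.Chars.split₀ l) :
    ∀ c ∈ w, PySem.Chars.isspace c = false := by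
  unfold PySem.Chars.split₀ at hw
  exact split₀go_nospace l [] [] (by simp) (by simp) w hw

theorem strip_chunk (line p : String) (hp : p ∈ PySem.Str.split₀ line) :
    PySem.Str.strip p = p := by
  have hmem : p.toList ∈ PySem.Chars.split₀ line.toList := by
    rw [← PySem.Str.split₀_map_toList]
    exact List.mem_map_of_mem hp
  have h1 : (PySem.Str.strip p).toList = p.toList := by
    rw [PySem.Str.toList_strip]
    exact strip_eq_self_of_noSpace p.toList (chunk_nospace line.toList p.toList hmem)
  have h2 : String.ofList (PySem.Str.strip p).toList = String.ofList p.toList := by rw [h1]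
  simpa using h2

-- --- the key validation lemma: A's redundant double normalization is the identity ---

theorem all_lhex_facts (c : List Char) (hall : c.all (fun x => lhex.contains x) = true) :
    PySem.Chars.strip c = c ∧ PySem.Chars.lower c = c ∧ ¬ (['0','x'] <:+: c) := by
  have hmem : ∀ x ∈ c, x ∈ lhex := by
    intro x hx
    have hx2 := List.all_eq_true.mp hall x hx
    exact List.contains_iff_mem.mp (by simpa using hx2)
  refine ⟨strip_eq_self_of_noSpace c (fun x hx => (mem_lhex_fix x (hmem x hx)).2.1), ?_, ?_⟩
  · unfold PySem.Chars.lower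
    have hmap := List.map_congr_left (fun x hx => (mem_lhex_fix x (hmem x hx)).1)
    simpa using hmap
  · intro hin
    have hxmem : 'x' ∈ c := hin.sublist.subset (by simp)
    exact (mem_lhex_fix 'x' (hmem 'x' hxmem)).2.2 (by decide)

theorem key_isHex64 (t : String) (w : List Char) (hw : t.toList = PySem.Chars.lower w)
    (hlen : t.toList.length = 64) :
    pvIsHex64 t = t.toList.all (fun x => ("0123456789abcdef".toList).contains x) := by
  unfold pvIsHex64
  have htl : (PySem.Str.replace (PySem.Str.lower (PySem.Str.strip t)) "0x" "").toList
      = PySem.Chars.replace (PySem.Chars.lower (PySem.Chars.strip t.toList)) ['0','x'] [] := by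
    rw [PySem.Str.toList_replace, PySem.Str.toList_lower, PySem.Str.toList_strip]
    rw [show ("0x" : String).toList = ['0','x'] from by decide,
        show ("" : String).toList = ([] : List Char) from by decide]
  rw [htl]
  by_cases hall : t.toList.all (fun x => ("0123456789abcdef".toList).contains x) = true
  · obtain ⟨hs, hl, hni⟩ := all_lhex_facts t.toList hall
    rw [hs, hl, replace_not_infix t.toList ['0','x'] [] (by decide) hni]
    rw [hall, hlen]
    simp
  · have hallf : t.toList.all (fun x => ("0123456789abcdef".toList).contains x) = false :=
      Bool.eq_false_iff.mpr hall
    rw [hallf]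
    rw [Bool.eq_false_iff]
    intro hcon
    simp only [Bool.and_eq_true, beq_iff_eq] at hcon
    obtain ⟨hulen, huall⟩ := hcon
    have hle1 : (PySem.Chars.replace (PySem.Chars.lower (PySem.Chars.strip t.toList)) ['0','x'] []).length
        ≤ (PySem.Chars.lower (PySem.Chars.strip t.toList)).length :=
      replace_nil_len_le _ _ (by decide)
    have hle2 : (PySem.Chars.lower (PySem.Chars.strip t.toList)).length
        = (PySem.Chars.strip t.toList).length := by
      simp [PySem.Chars.lower]
    have hle3 := strip_len_le t.toList
    have hs : PySem.Chars.strip t.toList = t.toList := strip_eq_of_len t.toList (by omega)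
    rw [hs] at hulen huall hle1 hle2
    have hni : ¬ (['0','x'] <:+: PySem.Chars.lower t.toList) := by
      intro hin
      have hlt := replace_nil_len_lt (PySem.Chars.lower t.toList) ['0','x'] (by decide) hin
      have hlow : (PySem.Chars.lower t.toList).length = t.toList.length := by
        simp [PySem.Chars.lower]
      omega
    have hueq : PySem.Chars.replace (PySem.Chars.lower t.toList) ['0','x'] []
        = PySem.Chars.lower t.toList := replace_not_infix _ _ _ (by decide) hni
    have hlc : PySem.Chars.lower t.toList = t.toList := by
      rw [hw, lower_lower]
    rw [hueq, hlc] at huall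
    exact hall huall

theorem norm_eq (s : String) : pvNormHex s = bNorm64 s := by
  unfold pvNormHex bNorm64
  have hpred : (fun c => (('0' ≤ c && c ≤ '9') || ('a' ≤ c && c ≤ 'f')))
      = (fun c => lhex.contains c) := funext hexL_eq
  simp only [hpred]
  by_cases hl : (PySem.Str.lower (PySem.Str.replace (PySem.Str.replace
      (PySem.Str.strip s) " " "") "0x" "")).toList.length = 64
  · rw [key_isHex64 _ (PySem.Str.replace (PySem.Str.replace (PySem.Str.strip s) " " "") "0x" "").toList
      (PySem.Str.toList_lower _) hl]
    rfl
  · have hf : ((PySem.Str.lower (PySem.Str.replace (PySem.Str.replace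
        (PySem.Str.strip s) " " "") "0x" "")).toList.length == 64) = false := by
      simpa using hl
    rw [hf]
    simp

-- --- small loop facts ---

theorem upper_take_ne (buf : List Char) (h : 64 ≤ buf.length) :
    (PySem.Str.upper (String.ofList (buf.take 64)) != "") = true := by
  rw [bne_iff_ne]
  intro he
  have h2 : (PySem.Str.upper (String.ofList (buf.take 64))).toList = [] := by rw [he]; rfl
  rw [PySem.Str.toList_upper, String.toList_ofList] at h2
  have h3 := congrArg List.length h2
  simp only [PySem.Chars.upper, List.length_map, List.length_take, List.length_nil] at h3
  omega

theorem pvStepA_fst (ex : List String) (lines : List String) (i : Nat) (line : String)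
    (cur : Option String) (keys : List String) (pairs : List (String × String))
    (hi : i < lines.length) :
    i < (pvStepA ex lines i line cur keys pairs).1 ∧
      (pvStepA ex lines i line cur keys pairs).1 ≤ lines.length := by
  have hge := pvInnerA_ge lines
    (pvHexFilterA (PySem.Str.replace (pvAfterA line "Priv (HEX):") "0x" "")) (i + 1)
  have hle := pvInnerA_le_len lines
    (pvHexFilterA (PySem.Str.replace (pvAfterA line "Priv (HEX):") "0x" "")) (i + 1) (by omega)
  unfold pvStepA pvScanA
  split_ifs <;> (try split) <;> constructor <;> simp <;> omega

-- --- take64 versus A's inner lookahead loop ---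

theorem bTake64_cons (t : BKind × List Char) (rest : List (BKind × List Char))
    (buf : List Char) :
    bTake64 (t :: rest) buf =
      if 64 ≤ buf.length then
        some (PySem.Str.upper (String.ofList (buf.take 64)), t :: rest)
      else bTake64 rest (buf ++ t.2) := by
  rw [bTake64.eq_def]

theorem bTake64_nil (buf : List Char) :
    bTake64 [] buf =
      if 64 ≤ buf.length then
        some (PySem.Str.upper (String.ofList (buf.take 64)), ([] : List (BKind × List Char)))
      else none := by
  rw [bTake64.eq_def]

theorem bTake64_full (toks : List (BKind × List Char)) (buf : List Char)
    (h : 64 ≤ buf.length) :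
    bTake64 toks buf = some (PySem.Str.upper (String.ofList (buf.take 64)), toks) := by
  cases toks with
  | nil => rw [bTake64_nil, if_pos h]
  | cons t rest => rw [bTake64_cons, if_pos h]

theorem take64_eq (lines : List String) (j : Nat) (buf : List Char) :
    bTake64 ((lines.drop j).map bTok) buf =
      if 64 ≤ (pvInnerA lines buf j).1.length then
        some (PySem.Str.upper (String.ofList ((pvInnerA lines buf j).1.take 64)),
          (lines.drop (pvInnerA lines buf j).2).map bTok)
      else none := by
  fun_induction pvInnerA lines buf j with
  | case1 buf j h ih =>
    rw [List.drop_eq_getElem_cons h.2, List.map_cons, bTake64_cons, if_neg (by omega)]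
    rw [show (bTok lines[j]).2 = pvHexFilterA lines[j] from bHexChars_eq lines[j]]
    exact ih
  | case2 buf j h =>
    by_cases hb : 64 ≤ buf.length
    · rw [bTake64_full _ _ hb, if_pos (by simpa using hb)]
    · have hj : lines.length ≤ j := by omega
      rw [List.drop_eq_nil_of_le hj]
      rw [show List.map bTok [] = [] from rfl, bTake64_nil, if_neg hb]

-- --- unfolding equations for bGo ---

theorem bGo_addr (ex : List String) (a : String) (hs : List Char)
    (rest : List (BKind × List Char)) (cur : Option String)
    (acc : List String × List (String × String)) :
    bGo ex ((BKind.addrK a, hs) :: rest) cur acc = bGo ex rest (some a) acc := by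
  rw [bGo.eq_def]

theorem bGo_skip (ex : List String) (hs : List Char)
    (rest : List (BKind × List Char)) (cur : Option String)
    (acc : List String × List (String × String)) :
    bGo ex ((BKind.skipK, hs) :: rest) cur acc = bGo ex rest cur acc := by
  rw [bGo.eq_def]

theorem bGo_pair (ex : List String) (a hx : String) (hs : List Char)
    (rest : List (BKind × List Char)) (cur : Option String)
    (acc : List String × List (String × String)) :
    bGo ex ((BKind.pairK a hx, hs) :: rest) cur acc =
      bGo ex rest cur
        (if PySem.Set.contains ex a then (acc.1, acc.2 ++ [(a, hx)])
         else (acc.1 ++ [hx], acc.2)) := by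
  rw [bGo.eq_def]

theorem bGo_priv (ex : List String) (buf0 hs : List Char)
    (rest : List (BKind × List Char)) (cur : Option String)
    (acc : List String × List (String × String)) :
    bGo ex ((BKind.privK buf0, hs) :: rest) cur acc =
      match bTake64 rest buf0 with
      | some (hx, rest') =>
        match cur with
        | some ca =>
          if ca != "" then
            bGo ex rest' none
              (if PySem.Set.contains ex ca then (acc.1, acc.2 ++ [(ca, hx)])
               else (acc.1 ++ [hx], acc.2))
          else bGo ex rest' (some ca) acc
        | none => bGo ex rest' none acc
      | none => bGo ex rest cur acc := by
  conv_lhs => rw [bGo.eq_def]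
  show (match h : bTake64 rest buf0 with
      | some (hx, rest') =>
        match cur with
        | some ca =>
          if ca != "" then
            bGo ex rest' none
              (if PySem.Set.contains ex ca then (acc.1, acc.2 ++ [(ca, hx)])
               else (acc.1 ++ [hx], acc.2))
          else bGo ex rest' (some ca) acc
        | none => bGo ex rest' none acc
      | none => bGo ex rest cur acc) = _
  split <;> rename_i heq <;> rw [heq]

-- --- one step of B's token machine mirrors one iteration of A's while loop ---

set_option maxHeartbeats 1000000 in
theorem step_eq (ex : List String) (lines : List String) (i : Nat) (line : String)
    (cur : Option String) (keys : List String) (pairs : List (String × String)) :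
    bGo ex (bTok line :: (lines.drop (i + 1)).map bTok) cur (keys, pairs)
      = bGo ex ((lines.drop (pvStepA ex lines i line cur keys pairs).1).map bTok)
          (pvStepA ex lines i line cur keys pairs).2.1
          ((pvStepA ex lines i line cur keys pairs).2.2.1,
           (pvStepA ex lines i line cur keys pairs).2.2.2) := by
  have hbt : bTok line = (bClassify line, bHexChars line.toList) := rfl
  by_cases t1 : PySem.Str.isIn "Pub Addr:" line = true
  case pos =>
    have hc : bClassify line = .addrK (PySem.Str.strip (pvAfterA line "Pub Addr:")) := by
      simp_all [bClassify, bTokens, List.find?, pvAfterA]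
    rw [hbt, hc, bGo_addr]
    unfold pvStepA
    simp_all
  case neg =>
  have e1 : PySem.Str.isIn "Pub Addr:" line = false := Bool.eq_false_iff.mpr t1
  by_cases t2 : PySem.Str.isIn "PubAddress:" line = true
  case pos =>
    have hc : bClassify line = .addrK (PySem.Str.strip (pvAfterA line "PubAddress:")) := by
      simp_all [bClassify, bTokens, List.find?, pvAfterA]
    rw [hbt, hc, bGo_addr]
    unfold pvStepA
    simp_all
  case neg =>
  have e2 : PySem.Str.isIn "PubAddress:" line = false := Bool.eq_false_iff.mpr t2
  by_cases t3 : PySem.Str.isIn "Public Addr:" line = true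
  case pos =>
    have hc : bClassify line = .addrK (PySem.Str.strip (pvAfterA line "Public Addr:")) := by
      simp_all [bClassify, bTokens, List.find?, pvAfterA]
    rw [hbt, hc, bGo_addr]
    unfold pvStepA
    simp_all
  case neg =>
  have e3 : PySem.Str.isIn "Public Addr:" line = false := Bool.eq_false_iff.mpr t3
  by_cases t4 : PySem.Str.isIn "Public Address:" line = true
  case pos =>
    have hc : bClassify line = .addrK (PySem.Str.strip (pvAfterA line "Public Address:")) := by
      simp_all [bClassify, bTokens, List.find?, pvAfterA]
    rw [hbt, hc, bGo_addr]
    unfold pvStepA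
    simp_all
  case neg =>
  have e4 : PySem.Str.isIn "Public Address:" line = false := Bool.eq_false_iff.mpr t4
  by_cases h5 : PySem.Str.isIn "Priv (HEX):" line = true
  case pos =>
    have hc : bClassify line
        = .privK (pvHexFilterA (PySem.Str.replace (pvAfterA line "Priv (HEX):") "0x" "")) := by
      rw [show pvHexFilterA (PySem.Str.replace (pvAfterA line "Priv (HEX):") "0x" "")
          = bHexChars (PySem.Str.replace (pvAfterA line "Priv (HEX):") "0x" "").toList from
          (bHexChars_eq _).symm]
      simp_all [bClassify, bTokens, List.find?, pvAfterA]
    rw [hbt, hc, bGo_priv, take64_eq lines (i + 1)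
      (pvHexFilterA (PySem.Str.replace (pvAfterA line "Priv (HEX):") "0x" ""))]
    rw [show pvInnerA lines
        (pvHexFilterA (PySem.Str.replace (pvAfterA line "Priv (HEX):") "0x" "")) (i + 1)
      = pvScanA lines line (i + 1) from rfl]
    by_cases h64 : 64 ≤ (pvScanA lines line (i + 1)).1.length
    case pos =>
      rw [if_pos h64]
      cases cur with
      | none =>
        unfold pvStepA
        simp_all [pvTruthy]
      | some ca =>
        by_cases hca : (ca != "") = true
        case pos =>
          have hne := upper_take_ne (pvScanA lines line (i + 1)).1 h64
          by_cases hex : PySem.Set.contains ex ca = true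
          · unfold pvStepA
            simp_all [pvTruthy]
          · unfold pvStepA
            simp_all [pvTruthy]
        case neg =>
          have hca' : (ca != "") = false := Bool.eq_false_iff.mpr hca
          unfold pvStepA
          simp_all [pvTruthy]
    case neg =>
      rw [if_neg h64]
      unfold pvStepA
      rw [if_neg (by simp_all), if_pos h5, if_neg h64]
  case neg =>
  have e5 : PySem.Str.isIn "Priv (HEX):" line = false := Bool.eq_false_iff.mpr h5
  cases hsp : PySem.Str.split₀ line with
  | nil =>
    have hc : bClassify line = .skipK := by
      simp_all [bClassify, bTokens, List.find?]
    rw [hbt, hc, bGo_skip]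
    unfold pvStepA
    simp_all
  | cons p0 tl =>
    cases tl with
    | nil =>
      have hc : bClassify line = .skipK := by
        simp_all [bClassify, bTokens, List.find?]
      rw [hbt, hc, bGo_skip]
      unfold pvStepA
      simp_all
    | cons p1 ps =>
      have hp0 : PySem.Str.strip p0 = p0 :=
        strip_chunk line p0 (by rw [hsp]; simp)
      have hnm : pvNormHex p1 = bNorm64 p1 := norm_eq p1
      cases hres : bNorm64 p1 with
      | none =>
        have hc : bClassify line = .skipK := by
          simp_all [bClassify, bTokens, List.find?]
        rw [hbt, hc, bGo_skip]
        unfold pvStepA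
        simp_all
      | some hx =>
        have hc : bClassify line = .pairK p0 hx := by
          simp_all [bClassify, bTokens, List.find?]
        rw [hbt, hc, bGo_pair]
        by_cases hex : PySem.Set.contains ex p0 = true
        · unfold pvStepA
          simp_all
        · unfold pvStepA
          simp_all

set_option maxHeartbeats 1000000 in
theorem loop_eq (ex : List String) (lines : List String) :
    ∀ (fuel i : Nat) (cur : Option String) (keys : List String)
      (pairs : List (String × String)),
      i ≤ lines.length → lines.length - i ≤ fuel →
      pvLoopA ex lines fuel i cur keys pairs
        = bGo ex ((lines.drop i).map bTok) cur (keys, pairs) := by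
  intro fuel
  induction fuel with
  | zero =>
    intro i cur keys pairs h1 h2
    rw [pvLoopA, List.drop_eq_nil_of_le (by omega)]
    rw [show List.map bTok [] = [] from rfl, bGo]
  | succ fuel ih =>
    intro i cur keys pairs h1 h2
    by_cases hi : i < lines.length
    case neg =>
      rw [List.drop_eq_nil_of_le (by omega), pvLoopA, dif_neg hi]
      rw [show List.map bTok [] = [] from rfl, bGo]
    case pos =>
      rw [List.drop_eq_getElem_cons hi, List.map_cons, pvLoopA, dif_pos hi]
      have hb := pvStepA_fst ex lines i lines[i] cur keys pairs hi
      rw [ih (pvStepA ex lines i lines[i] cur keys pairs).1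
        (pvStepA ex lines i lines[i] cur keys pairs).2.1
        (pvStepA ex lines i lines[i] cur keys pairs).2.2.1
        (pvStepA ex lines i lines[i] cur keys pairs).2.2.2
        (by omega) (by omega)]
      exact (step_eq ex lines i lines[i] cur keys pairs).symm

theorem main_eq (text : String) (extras : Option (List String)) :
    parse_vanity_v2 text extras = parse_vanity_v2_alt text extras := by
  unfold parse_vanity_v2 parse_vanity_v2_alt
  have h := loop_eq (PySem.Set.ofList (extras.getD [])) (PySem.Str.splitlines text)
    (PySem.Str.splitlines text).length 0 none [] [] (by omega) (by omega)
  simpa using h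

-- ===== VERDICT (by name: the statement is the Claim_ definition above) =====
theorem parse_vanity_v2_spec : Claim_equal_parse_vanity_v2 := by
  intro text extras _
  unfold Spec_parse_vanity_v2
  exact main_eq text extras
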